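-- pv_equiv track=rewrite | github.com/SomeStein/maskmatch | maskmatch/core.py | generate_singlebit_lookup
-- ===== SOURCE A (Python) =====
-- def generate_singlebit_lookup(precombined):
--
--     lookups = []
--     for masks, mult in precombined:
--         lookup = dict()
--         for bit in range(100):
--             singlebitmask = 1 << bit
--             lookup[bit] = set()
--             for mask in masks:
--                 if mask & singlebitmask == 0:
--                     lookup[bit].add(mask)
--         lookups.append(lookup)
--     return lookups
-- ===== SOURCE B (Python) =====
-- def generate_singlebit_lookup(precombined):
--     MASK100 = (1 << 100) - 1
--     lookups = []
--     for masks, mult in precombined: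
--         full = set(masks)
--         lookup = {bit: set(full) for bit in range(100)}
--         for mask in masks:
--             m = mask & MASK100
--             bit = 0
--             while m:
--                 if m & 1:
--                     lookup[bit].discard(mask)
--                 m >>= 1
--                 bit += 1
--         lookups.append(lookup)
--     return lookups
-- ===== Notes on version B (the rewrite author's own statement) =====
-- stated objective: alternative
-- what changed: B inverts the construction: instead of testing, for each of the 100 bits, every mask and adding the passing ones to an empty set, it initializes every bit's entry to the full mask set and then walks each mask's set bits (within the low 100 bits) discarding the mask from exactly those entries.
import Mathlib
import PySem

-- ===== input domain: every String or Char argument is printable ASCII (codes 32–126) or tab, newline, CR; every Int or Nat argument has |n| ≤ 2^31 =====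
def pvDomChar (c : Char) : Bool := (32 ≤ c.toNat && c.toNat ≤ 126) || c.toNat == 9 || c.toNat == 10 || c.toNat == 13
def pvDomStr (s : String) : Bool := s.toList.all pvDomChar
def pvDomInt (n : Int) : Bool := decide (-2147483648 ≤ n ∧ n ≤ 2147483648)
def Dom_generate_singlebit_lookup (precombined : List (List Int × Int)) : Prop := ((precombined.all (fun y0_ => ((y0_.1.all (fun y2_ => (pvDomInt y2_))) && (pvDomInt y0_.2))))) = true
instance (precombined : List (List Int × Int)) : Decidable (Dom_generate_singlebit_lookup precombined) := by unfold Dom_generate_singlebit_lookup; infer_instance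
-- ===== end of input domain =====

-- B replaces A's additive per-bit membership scan by complement-and-removal: each bit's
-- entry starts as the full mask set and each mask is discarded from the entries of its own
-- set bits (alternative decomposition; not claimed faster).

-- ===== PORT A =====
-- one row of A's result: the dict built for one (masks, mult) pair, returned as its items list
def pvRowA (masks : List Int) : List (Int × List Int) :=
  ((PySem.List.pyRange 0 100).foldl (fun lookup bit =>
      -- lookup[bit] = set(); then the mask loop adds into it
      masks.foldl (fun lookup mask =>
        -- singlebitmask = 1 << bit (inlined): bit ∈ range(100) is nonnegative, so 1 << bit = 2 ^ bit
        if PySem.Int.band mask ((2:Int) ^ bit.toNat) = 0 then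
          -- lookup[bit].add(mask): key bit is always present here, dflt [] is never used
          lookup.modify bit [] (fun s => PySem.Set.add s mask)
        else lookup)
        (lookup.insert bit PySem.Set.empty)) PySem.Dict.empty).items

def generate_singlebit_lookup (precombined : List (List Int × Int)) : List (List (Int × List Int)) :=
  precombined.foldl (fun lookups p => lookups ++ [pvRowA p.1]) []

-- ===== PORT B =====
-- the 'while m:' loop of Source B: discard mask from lookup[bit] for every set bit of m
def pvBitLoop (m : Nat) (bit : Int) (mask : Int) (lookup : PySem.Dict Int (PySem.Set Int)) :
    PySem.Dict Int (PySem.Set Int) :=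
  if h : m = 0 then lookup
  else
    pvBitLoop (m / 2) (bit + 1) mask
      (if m % 2 = 1 then lookup.modify bit [] (fun s => PySem.Set.discard s mask) else lookup)
termination_by m
decreasing_by omega

-- one row of B's result: lookup = {bit: set(full) for bit in range(100)} with full = set(masks)
-- (inlined), then removal along each mask's set bits; MASK100 = (1 << 100) - 1 = 2^100 - 1
def pvRowB (masks : List Int) : List (Int × List Int) :=
  (masks.foldl (fun d mask =>
      pvBitLoop (PySem.Int.band mask ((2:Int) ^ 100 - 1)).toNat 0 mask d)
    ((PySem.List.pyRange 0 100).foldl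
      (fun d bit => d.insert bit (PySem.Set.ofList masks)) PySem.Dict.empty)).items

def generate_singlebit_lookup_alt (precombined : List (List Int × Int)) : List (List (Int × List Int)) :=
  precombined.foldl (fun lookups p => lookups ++ [pvRowB p.1]) []

-- ===== PRECONDITION & SPEC =====
def Spec_generate_singlebit_lookup (precombined : List (List Int × Int)) (out : List (List (Int × List Int))) : Prop := out = generate_singlebit_lookup_alt precombined
instance (precombined : List (List Int × Int)) (out : List (List (Int × List Int))) : Decidable (Spec_generate_singlebit_lookup precombined out) := by unfold Spec_generate_singlebit_lookup; infer_instance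

-- ===== CLAIM (what is proved, stated in full; the proofs are below) =====
def Claim_equal_generate_singlebit_lookup : Prop := ∀ (precombined : List (List Int × Int)), Dom_generate_singlebit_lookup precombined → Spec_generate_singlebit_lookup precombined (generate_singlebit_lookup precombined)

-- ===== LEMMAS AND PROOFS =====

theorem pvRnodup : (PySem.List.pyRange 0 100).Nodup := by decide

-- A's inner mask loop at a fixed key collapses to one insert at that key
theorem pv_stepA_collapse (l : List Int) (prev : PySem.Dict Int (PySem.Set Int)) (bit sbm : Int)
    (s0 : PySem.Set Int) :
    l.foldl (fun d mask =>
        if PySem.Int.band mask sbm = 0 then d.modify bit [] (fun s => PySem.Set.add s mask) else d)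
      (prev.insert bit s0)
    = prev.insert bit
        (l.foldl (fun s mask => if PySem.Int.band mask sbm = 0 then PySem.Set.add s mask else s) s0) := by
  induction l generalizing s0 with
  | nil => rfl
  | cons a tl ih =>
    simp only [List.foldl_cons]
    by_cases h : PySem.Int.band a sbm = 0
    · rw [if_pos h, if_pos h]
      have hstep : (prev.insert bit s0).modify bit [] (fun s => PySem.Set.add s a)
          = prev.insert bit (PySem.Set.add s0 a) := by
        simp only [PySem.Dict.modify, PySem.Dict.getD_insert_self, PySem.Dict.insert_insert_self]
      rw [hstep, ih]
    · rw [if_neg h, if_neg h, ih]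

-- the add-if loop is set-update with the filtered list
theorem pv_addif_eq (l : List Int) (sbm : Int) (s : PySem.Set Int) :
    l.foldl (fun s mask => if PySem.Int.band mask sbm = 0 then PySem.Set.add s mask else s) s
    = PySem.Set.update s (l.filter (fun x => decide (PySem.Int.band x sbm = 0))) := by
  induction l generalizing s with
  | nil => rfl
  | cons a tl ih =>
    by_cases h : PySem.Int.band a sbm = 0
    · simp [h, ih, PySem.Set.update_cons]
    · simp [h, ih]

theorem pv_A_rowEq (masks : List Int) :
    pvRowA masks
    = (PySem.List.pyRange 0 100).map (fun bit =>
        (bit, PySem.Set.ofList (masks.filter (fun x =>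
          decide (PySem.Int.band x ((2:Int) ^ bit.toNat) = 0))))) := by
  unfold pvRowA
  rw [PySem.List.foldl_congr_mem _ _
      (fun (d : PySem.Dict Int (PySem.Set Int)) bit =>
        d.insert bit (PySem.Set.ofList (masks.filter (fun x =>
          decide (PySem.Int.band x ((2:Int) ^ bit.toNat) = 0))))) _
      (fun d bit _ =>
        (pv_stepA_collapse masks d bit ((2:Int) ^ bit.toNat) PySem.Set.empty).trans
          (by rw [pv_addif_eq]; exact congrArg _ (PySem.Set.update_nil_left _)))]
  rw [PySem.Dict.items_foldl_insert_fresh _ (fun bit => bit) _ _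
      (fun a _ => PySem.Dict.contains_empty a) (by simpa using pvRnodup)]
  simp [PySem.Dict.empty]

-- effect of the bit loop on one entry: discard iff the corresponding bit of m is set
theorem pv_bitLoop_getD (m : Nat) : ∀ (bit mask : Int) (d : PySem.Dict Int (PySem.Set Int)) (k : Int),
    (pvBitLoop m bit mask d).getD k []
    = if bit ≤ k ∧ Nat.testBit m (k - bit).toNat then
        PySem.Set.discard (d.getD k []) mask
      else d.getD k [] := by
  induction m using Nat.strong_induction_on with
  | _ m ih =>
    intro bit mask d k
    rw [pvBitLoop]
    split
    · next h => simp [h, Nat.zero_testBit]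
    · next h =>
      rw [ih (m / 2) (by omega)]
      have hD : (if m % 2 = 1 then d.modify bit [] (fun s => PySem.Set.discard s mask) else d).getD k []
          = if k = bit ∧ m % 2 = 1 then PySem.Set.discard (d.getD bit []) mask else d.getD k [] := by
        by_cases hm2 : m % 2 = 1
        · rw [if_pos hm2, PySem.Dict.getD_modify]
          by_cases hk : k = bit
          · rw [if_pos hk, if_pos (show k = bit ∧ m % 2 = 1 from ⟨hk, hm2⟩)]
          · rw [if_neg hk, if_neg (fun hc => hk hc.1)]
        · rw [if_neg hm2, if_neg (fun hc => hm2 hc.2)]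
      rw [hD]
      by_cases hk : k = bit
      · subst hk
        have h2 : (k - k).toNat = 0 := by omega
        rw [if_neg (show ¬ (k + 1 ≤ k ∧ Nat.testBit (m / 2) (k - (k + 1)).toNat = true) from
          fun hc => absurd hc.1 (by omega))]
        by_cases hm2 : m % 2 = 1
        · rw [if_pos (show k = k ∧ m % 2 = 1 from ⟨rfl, hm2⟩),
            if_pos (show k ≤ k ∧ Nat.testBit m (k - k).toNat = true from
              ⟨le_refl k, by rw [h2, Nat.testBit_zero]; exact decide_eq_true hm2⟩)]
        · rw [if_neg (show ¬ (k = k ∧ m % 2 = 1) from fun hc => hm2 hc.2),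
            if_neg (show ¬ (k ≤ k ∧ Nat.testBit m (k - k).toNat = true) from
              fun hc => hm2 (by have h4 := hc.2; rw [h2, Nat.testBit_zero] at h4;
                                exact of_decide_eq_true h4))]
      · rw [if_neg (show ¬ (k = bit ∧ m % 2 = 1) from fun hc => hk hc.1)]
        by_cases hbk : bit ≤ k
        · have h3 : (k - bit).toNat = (k - (bit + 1)).toNat + 1 := by omega
          rw [h3, Nat.testBit_add_one]
          by_cases ht : Nat.testBit (m / 2) (k - (bit + 1)).toNat = true
          · rw [if_pos (show bit + 1 ≤ k ∧ Nat.testBit (m / 2) (k - (bit + 1)).toNat = true from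
                ⟨by omega, ht⟩),
              if_pos (show bit ≤ k ∧ Nat.testBit (m / 2) (k - (bit + 1)).toNat = true from
                ⟨hbk, ht⟩)]
          · rw [if_neg (show ¬ (bit + 1 ≤ k ∧ Nat.testBit (m / 2) (k - (bit + 1)).toNat = true) from
                fun hc => ht hc.2),
              if_neg (show ¬ (bit ≤ k ∧ Nat.testBit (m / 2) (k - (bit + 1)).toNat = true) from
                fun hc => ht hc.2)]
        · rw [if_neg (show ¬ (bit + 1 ≤ k ∧ Nat.testBit (m / 2) (k - (bit + 1)).toNat = true) from
              fun hc => hbk (le_trans (by omega) hc.1)),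
            if_neg (show ¬ (bit ≤ k ∧ Nat.testBit m (k - bit).toNat = true) from
              fun hc => hbk hc.1)]

-- the bit loop never touches keys outside range(100), so the key list is preserved
theorem pv_bitLoop_keys (m : Nat) : ∀ (bit mask : Int) (d : PySem.Dict Int (PySem.Set Int)),
    0 ≤ bit → m < 2 ^ (100 - bit.toNat) → d.keys = PySem.List.pyRange 0 100 →
    (pvBitLoop m bit mask d).keys = PySem.List.pyRange 0 100 := by
  induction m using Nat.strong_induction_on with
  | _ m ih =>
    intro bit mask d hb hlt hkeys
    rw [pvBitLoop]
    split
    · exact hkeys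
    · next h =>
      have hbn : bit.toNat < 100 := by
        by_contra h'
        have h0 : (100 : Nat) - bit.toNat = 0 := by omega
        rw [h0, pow_zero] at hlt
        omega
      have hmem : bit ∈ d.keys := by
        rw [hkeys]
        exact PySem.List.mem_pyRange_one.mpr ⟨hb, by omega⟩
      have hcont : d.contains bit = true := (PySem.Dict.contains_iff_mem_keys d bit).mpr hmem
      have hk' :
          ((if m % 2 = 1 then d.modify bit [] (fun s => PySem.Set.discard s mask) else d)).keys
          = PySem.List.pyRange 0 100 := by
        by_cases hm2 : m % 2 = 1
        · rw [if_pos hm2, PySem.Dict.keys_modify, PySem.Dict.keys_insert_of_contains d _ hcont,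
            hkeys]
        · rw [if_neg hm2, hkeys]
      apply ih (m / 2) (by omega) (bit + 1) mask _ (by omega) ?_ hk'
      have ht : (bit + 1).toNat = bit.toNat + 1 := by omega
      have hpow : (2:Nat) ^ (100 - bit.toNat) = 2 ^ (100 - (bit + 1).toNat) * 2 := by
        rw [ht, ← pow_succ]
        congr 1
        omega
      rw [hpow] at hlt
      omega

-- B's outer mask loop, read at one key
theorem pv_foldMasks_getD (l : List Int) : ∀ (d : PySem.Dict Int (PySem.Set Int)) (k : Int), 0 ≤ k →
    ((l.foldl (fun d mask =>
        pvBitLoop (PySem.Int.band mask ((2:Int) ^ 100 - 1)).toNat 0 mask d) d).getD k [])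
    = l.foldl (fun s mask =>
        if Nat.testBit (PySem.Int.band mask ((2:Int) ^ 100 - 1)).toNat k.toNat then
          PySem.Set.discard s mask
        else s) (d.getD k []) := by
  induction l with
  | nil => intro d k hk; rfl
  | cons a tl ih =>
    intro d k hk
    simp only [List.foldl_cons]
    rw [ih _ k hk, pv_bitLoop_getD]
    have h0 : ((k : Int) - 0).toNat = k.toNat := by omega
    simp only [h0, hk, true_and]

theorem pv_band_M_lt (x : Int) : (PySem.Int.band x ((2:Int) ^ 100 - 1)).toNat < 2 ^ 100 := by
  have h1 : (0:Nat) < 2 ^ 100 := Nat.two_pow_pos 100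
  have hM : ((2:Int) ^ 100 - 1) = ((2 ^ 100 - 1 : Nat) : Int) := by
    rw [Nat.cast_sub (by omega), Nat.cast_pow]
    norm_num
  rw [hM]
  unfold PySem.Int.band
  by_cases hx : 0 ≤ x
  · rw [if_pos hx, if_pos (Int.natCast_nonneg _), Int.toNat_natCast, Int.toNat_natCast]
    have := Nat.and_le_right (n := x.toNat) (m := 2 ^ 100 - 1)
    omega
  · rw [if_neg hx, if_pos (Int.natCast_nonneg _), Int.toNat_natCast, Int.toNat_natCast]
    omega

theorem pv_foldMasks_keys (l : List Int) : ∀ (d : PySem.Dict Int (PySem.Set Int)),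
    d.keys = PySem.List.pyRange 0 100 →
    (l.foldl (fun d mask =>
        pvBitLoop (PySem.Int.band mask ((2:Int) ^ 100 - 1)).toNat 0 mask d) d).keys
    = PySem.List.pyRange 0 100 := by
  induction l with
  | nil => intro d hd; exact hd
  | cons a tl ih =>
    intro d hd
    simp only [List.foldl_cons]
    exact ih _ (pv_bitLoop_keys _ 0 a d (by omega) (by simpa using pv_band_M_lt a) hd)

-- a discard-if loop over the list is a filter
theorem pv_discardif_eq (l : List Int) (c : Int → Bool) : ∀ (s : PySem.Set Int),
    l.foldl (fun s x => if c x then PySem.Set.discard s x else s) s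
    = s.filter (fun x => !(c x && l.contains x)) := by
  induction l with
  | nil => intro s; simp
  | cons a tl ih =>
    intro s
    simp only [List.foldl_cons]
    rw [ih]
    by_cases h : c a = true
    · rw [if_pos h]
      simp only [PySem.Set.discard, List.filter_filter]
      refine List.filter_congr ?_
      intro x hx
      by_cases hxa : x = a
      · subst hxa; simp [h]
      · simp [hxa]
    · rw [if_neg h]
      refine List.filter_congr ?_
      intro x hx
      by_cases hxa : x = a
      · subst hxa
        simp only [Bool.not_eq_true] at h
        simp [h]
      · simp [hxa]

-- filtering commutes with Python set construction
theorem pv_ofList_filter (p : Int → Bool) (l : List Int) :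
    (PySem.Set.ofList l).filter p = PySem.Set.ofList (l.filter p) := by
  induction l with
  | nil => rfl
  | cons a tl ih =>
    rw [PySem.Set.ofList_cons]
    by_cases h : p a = true
    · rw [List.filter_cons_of_pos h, List.filter_cons_of_pos h, PySem.Set.ofList_cons, ← ih]
      simp only [PySem.Set.discard, List.filter_filter]
      refine congrArg (a :: ·) (List.filter_congr ?_)
      intro x hx
      exact Bool.and_comm _ _
    · have h' : p a = false := by simpa using h
      rw [List.filter_cons_of_neg (by simp [h']), List.filter_cons_of_neg (by simp [h']), ← ih]
      simp only [PySem.Set.discard, List.filter_filter]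
      refine List.filter_congr ?_
      intro x hx
      by_cases hxa : x = a
      · subst hxa; simp [h']
      · simp [hxa]

theorem pv_B_rowEq (masks : List Int) :
    pvRowB masks
    = (PySem.List.pyRange 0 100).map (fun bit =>
        (bit, PySem.Set.ofList (masks.filter (fun x =>
          ! Nat.testBit (PySem.Int.band x ((2:Int) ^ 100 - 1)).toNat bit.toNat)))) := by
  unfold pvRowB
  have h0 : ((PySem.List.pyRange 0 100).foldl
      (fun (d : PySem.Dict Int (PySem.Set Int)) bit => d.insert bit (PySem.Set.ofList masks))
      PySem.Dict.empty).items
      = (PySem.List.pyRange 0 100).map (fun bit => (bit, PySem.Set.ofList masks)) := by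
    rw [PySem.Dict.items_foldl_insert_fresh _ (fun bit => bit) _ _
        (fun a _ => PySem.Dict.contains_empty a) (by simpa using pvRnodup)]
    simp [PySem.Dict.empty]
  have hkeys0 : ((PySem.List.pyRange 0 100).foldl
      (fun (d : PySem.Dict Int (PySem.Set Int)) bit => d.insert bit (PySem.Set.ofList masks))
      PySem.Dict.empty).keys = PySem.List.pyRange 0 100 := by
    simp only [PySem.Dict.keys, h0, List.map_map]
    simp [Function.comp_def]
  have hkeysF := pv_foldMasks_keys masks _ hkeys0
  rw [PySem.Dict.items_eq_map_keys _ (by rw [hkeysF]; exact pvRnodup) []]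
  rw [hkeysF]
  refine List.map_congr_left ?_
  intro k hk
  obtain ⟨hk0, hk1⟩ := PySem.List.mem_pyRange_one.mp hk
  refine congrArg (Prod.mk k) ?_
  rw [pv_foldMasks_getD masks _ k hk0]
  have hmem : (k, PySem.Set.ofList masks) ∈ ((PySem.List.pyRange 0 100).foldl
      (fun (d : PySem.Dict Int (PySem.Set Int)) bit => d.insert bit (PySem.Set.ofList masks))
      PySem.Dict.empty).items := by
    rw [h0]
    exact List.mem_map.mpr ⟨k, hk, rfl⟩
  rw [PySem.Dict.getD_of_mem_items _ hmem (by rw [hkeys0]; exact pvRnodup) []]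
  rw [pv_discardif_eq, ← pv_ofList_filter]
  refine List.filter_congr ?_
  intro x hx
  have hxm : x ∈ masks := (PySem.Set.mem_ofList masks x).mp hx
  simp [hxm]

-- the two per-bit membership conditions agree
theorem pv_bitfact (x : Int) (n : Nat) (hn : n < 100) :
    decide (PySem.Int.band x ((2:Int) ^ n) = 0)
    = ! Nat.testBit (PySem.Int.band x ((2:Int) ^ 100 - 1)).toNat n := by
  have h1 : (0:Nat) < 2 ^ 100 := Nat.two_pow_pos 100
  have hM : ((2:Int) ^ 100 - 1) = ((2 ^ 100 - 1 : Nat) : Int) := by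
    rw [Nat.cast_sub (by omega), Nat.cast_pow]
    norm_num
  have hP : ((2:Int) ^ n) = ((2 ^ n : Nat) : Int) := by
    rw [Nat.cast_pow]
    norm_num
  rw [hM, hP]
  unfold PySem.Int.band
  by_cases hx : 0 ≤ x
  · rw [if_pos hx, if_pos (Int.natCast_nonneg _), if_pos hx, if_pos (Int.natCast_nonneg _),
      Int.toNat_natCast, Int.toNat_natCast, Int.toNat_natCast]
    rw [Nat.and_two_pow, Nat.testBit_and, Nat.testBit_two_pow_sub_one]
    cases h : x.toNat.testBit n
    · simp
    · simp [hn]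
  · rw [if_neg hx, if_pos (Int.natCast_nonneg _), if_neg hx, if_pos (Int.natCast_nonneg _),
      Int.toNat_natCast, Int.toNat_natCast, Int.toNat_natCast]
    set y := (-x - 1).toNat with hy
    have hand : (2:Nat) ^ n &&& y = (y.testBit n).toNat * 2 ^ n := by
      rw [Nat.and_comm, Nat.and_two_pow]
    have hle : (2 ^ 100 - 1) &&& y ≤ 2 ^ 100 - 1 := Nat.and_le_left
    have hlt : (2 ^ 100 - 1) &&& y < 2 ^ 100 := by omega
    have hsub : 2 ^ 100 - 1 - ((2 ^ 100 - 1) &&& y) = 2 ^ 100 - (((2 ^ 100 - 1) &&& y) + 1) := by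
      omega
    rw [hsub, Nat.testBit_two_pow_sub_succ hlt, Nat.testBit_and, Nat.testBit_two_pow_sub_one, hand]
    cases h : y.testBit n
    · simp [hn]
    · simp [hn]

theorem pv_rowAB (masks : List Int) : pvRowA masks = pvRowB masks := by
  rw [pv_A_rowEq, pv_B_rowEq]
  refine List.map_congr_left ?_
  intro bit hbit
  obtain ⟨hb0, hb1⟩ := PySem.List.mem_pyRange_one.mp hbit
  refine congrArg (Prod.mk bit) (congrArg PySem.Set.ofList (List.filter_congr ?_))
  intro x _
  exact pv_bitfact x bit.toNat (by omega)

-- ===== VERDICT (by name: the statement is the Claim_ definition above) =====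
theorem generate_singlebit_lookup_spec : Claim_equal_generate_singlebit_lookup := by
  intro precombined _
  unfold Spec_generate_singlebit_lookup generate_singlebit_lookup generate_singlebit_lookup_alt
  exact PySem.List.foldl_congr_mem _ _ _ _ (fun acc p _ => by rw [pv_rowAB])
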